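-- pv_equiv track=rewrite | github.com/UnsignedArduino/Musical-Images-Generator | main.py | time_to_col
-- ===== SOURCE A (Python) =====
-- def time_to_col(time: int) -> list[str]:
--     # Generates every color in Arcade palette except transparent, white and
--     # black
--     colors = [str(hex(c)[2:]) for c in range(2, 15)]
--     times = range(50, 14 * 50, 50)
--     # Gets the color to to indicate the time, so red is less then 50 ms,
--     # pink is less then 100 ms, orange is less then 150 ms, etc
--     # Brown is over 600 ms
--     color = colors[-1]
--     for c, t in zip(colors, times):
--         if time < t:
--             color = c
--             break
--     column = []
--     # Gets binary representation of time and splits it up and formats it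
--     # into Arcade-style image values ("1" is white, "." is transparent)
--     for bit in bin(time)[2:]:
--         column.append(color if bit == "1" else ".")
--     column.reverse()
--     column += "." * (88 - len(column))
--     return column
-- ===== SOURCE B (Python) =====
-- def time_to_col(time: int) -> list[str]:
--     # closed-form color index instead of A's scan-with-break; bits extracted
--     # arithmetically LSB-first instead of reversing bin(time)[2:]
--     idx = min(max(time // 50, 0), 12)
--     color = "0123456789abcdef"[idx + 2]
--     column = []
--     n = abs(time)
--     while n:
--         column.append(color if n & 1 else ".")
--         n >>= 1
--     column += ["."] * (88 - len(column))
--     return column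
-- ===== Notes on version B (the rewrite author's own statement) =====
-- stated objective: simpler
-- what changed: B computes the color in closed form (floor-divide time by the threshold step, clamp into the palette range, index a hex-digit string) instead of A's zip/break threshold scan, and emits the column bits least-significant-first by repeated halving of abs(time) instead of mapping over the reversed binary string of bin(time); the transparent padding absorbs A's sign-prefix artefact for negative time, so the outputs agree everywhere.
import Mathlib
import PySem

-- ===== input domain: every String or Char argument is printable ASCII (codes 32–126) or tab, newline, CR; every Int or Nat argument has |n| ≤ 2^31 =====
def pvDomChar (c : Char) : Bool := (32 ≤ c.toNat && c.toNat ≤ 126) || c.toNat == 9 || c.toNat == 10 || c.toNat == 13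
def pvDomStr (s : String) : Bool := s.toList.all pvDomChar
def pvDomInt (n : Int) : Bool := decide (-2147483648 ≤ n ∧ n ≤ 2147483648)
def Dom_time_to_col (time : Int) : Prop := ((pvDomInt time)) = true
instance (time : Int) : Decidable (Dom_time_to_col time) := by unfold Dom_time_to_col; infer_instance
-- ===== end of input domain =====

-- B replaces A's threshold scan by a clamped closed-form color index and builds the
-- column LSB-first arithmetically instead of reversing bin(time)[2:] (objective: simpler).

-- ===== PORT A =====
-- hex(c)[2:] for 0 ≤ c < 16 (exact on that range; A only uses c in 2..14)
def pvHexDigit (c : Int) : String :=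
  String.mk [("0123456789abcdef".toList).getD c.toNat '?']

-- binary digits of n, most significant first (empty for 0)
def pvBinDigitsNat : Nat → List Char
  | 0 => []
  | n+1 => pvBinDigitsNat ((n+1)/2) ++ [if (n+1) % 2 == 1 then '1' else '0']

-- bin(time)[2:] : "-0b…"[2:] = 'b' :: digits for negative, "0b0"[2:] = "0" for zero
def pvBinTail (time : Int) : List Char :=
  if time < 0 then 'b' :: pvBinDigitsNat time.natAbs
  else if time = 0 then ['0']
  else pvBinDigitsNat time.natAbs

-- the `for c, t in zip(colors, times): if time < t: color = c; break` loop
def pvColorLoop (time : Int) : List (String × Int) → String → String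
  | [], color => color
  | (c, t) :: rest, color => if time < t then c else pvColorLoop time rest color

def time_to_col (time : Int) : List String :=
  let colors := (PySem.List.pyRange 2 15 1).map (fun c => pvHexDigit c)
  let times := PySem.List.pyRange 50 (14 * 50) 50
  -- colors[-1]; colors is a nonempty literal list, so pyGet? is some
  let color0 := (PySem.List.pyGet? colors (-1)).getD ""
  let color := pvColorLoop time (colors.zip times) color0
  let column := (pvBinTail time).foldl
    (fun acc bit => acc ++ [if bit == '1' then color else "."]) []
  let column := column.reverse
  column ++ List.replicate (88 - column.length) "."

-- ===== PORT B =====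
-- the `while n: append(color if n & 1 else "."); n >>= 1` loop, LSB first
def pvLsbBits (color : String) : Nat → List String
  | 0 => []
  | n+1 => (if (n+1) % 2 == 1 then color else ".") :: pvLsbBits color ((n+1)/2)

def time_to_col_alt (time : Int) : List String :=
  let idx := min (max (PySem.Int.floordiv time 50) 0) 12
  -- "0123456789abcdef"[idx + 2]; idx + 2 is in 2..14, so nonnegative indexing is exact
  let color := String.mk [("0123456789abcdef".toList).getD (idx + 2).toNat '?']
  let column := pvLsbBits color time.natAbs
  column ++ List.replicate (88 - column.length) "."

-- ===== PRECONDITION & SPEC =====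
def Spec_time_to_col (time : Int) (out : List String) : Prop := out = time_to_col_alt time
instance (time : Int) (out : List String) : Decidable (Spec_time_to_col time out) := by unfold Spec_time_to_col; infer_instance

-- ===== CLAIM (what is proved, stated in full; the proofs are below) =====
def Claim_equal_time_to_col : Prop := ∀ (time : Int), Dom_time_to_col time → Spec_time_to_col time (time_to_col time)

-- ===== LEMMAS AND PROOFS =====

theorem pv_foldl_append_map (f : Char → String) (l : List Char) (acc : List String) :
    l.foldl (fun acc bit => acc ++ [f bit]) acc = acc ++ l.map f := by
  induction l generalizing acc with
  | nil => simp
  | cons x xs ih => simp [List.foldl, ih]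

theorem pv_rev_map_digits (color : String) (n : Nat) :
    ((pvBinDigitsNat n).map (fun bit => if bit == '1' then color else ".")).reverse
      = pvLsbBits color n := by
  induction n using pvBinDigitsNat.induct with
  | case1 => simp [pvBinDigitsNat, pvLsbBits]
  | case2 n ih =>
    rw [pvBinDigitsNat, pvLsbBits, List.map_append, List.reverse_append, ih]
    rcases Nat.mod_two_eq_zero_or_one (n+1) with h | h <;> simp [h]

theorem pv_lsb_len (color : String) (n : Nat) (k : Nat) (h : n < 2 ^ k) :
    (pvLsbBits color n).length ≤ k := by
  induction n using pvBinDigitsNat.induct generalizing k with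
  | case1 => simp [pvLsbBits]
  | case2 n ih =>
    rw [pvLsbBits]
    match k, h with
    | k+1, h =>
      simp only [List.length_cons]
      have : (n+1)/2 < 2 ^ k := by omega
      exact Nat.succ_le_succ (ih k this)

-- the threshold scan as nested ifs equals the clamped index, by 14-way case split
theorem pv_chain (time : Int) (v : Int → String) :
    (if time < 50 then v 2 else if time < 100 then v 3 else if time < 150 then v 4
     else if time < 200 then v 5 else if time < 250 then v 6 else if time < 300 then v 7
     else if time < 350 then v 8 else if time < 400 then v 9 else if time < 450 then v 10
     else if time < 500 then v 11 else if time < 550 then v 12 else if time < 600 then v 13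
     else if time < 650 then v 14 else v 14)
    = v (min (max (time / 50) 0) 12 + 2) := by
  by_cases h0 : time < 50
  · rw [if_pos h0]
    have harg : min (max (time / 50) 0) 12 + 2 = 2 := by simp only [min_def, max_def]; split_ifs <;> omega
    rw [harg]
  · rw [if_neg h0]
    by_cases h1 : time < 100
    · rw [if_pos h1]
      have harg : min (max (time / 50) 0) 12 + 2 = 3 := by simp only [min_def, max_def]; split_ifs <;> omega
      rw [harg]
    · rw [if_neg h1]
      by_cases h2 : time < 150
      · rw [if_pos h2]
        have harg : min (max (time / 50) 0) 12 + 2 = 4 := by simp only [min_def, max_def]; split_ifs <;> omega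
        rw [harg]
      · rw [if_neg h2]
        by_cases h3 : time < 200
        · rw [if_pos h3]
          have harg : min (max (time / 50) 0) 12 + 2 = 5 := by simp only [min_def, max_def]; split_ifs <;> omega
          rw [harg]
        · rw [if_neg h3]
          by_cases h4 : time < 250
          · rw [if_pos h4]
            have harg : min (max (time / 50) 0) 12 + 2 = 6 := by simp only [min_def, max_def]; split_ifs <;> omega
            rw [harg]
          · rw [if_neg h4]
            by_cases h5 : time < 300
            · rw [if_pos h5]
              have harg : min (max (time / 50) 0) 12 + 2 = 7 := by simp only [min_def, max_def]; split_ifs <;> omega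
              rw [harg]
            · rw [if_neg h5]
              by_cases h6 : time < 350
              · rw [if_pos h6]
                have harg : min (max (time / 50) 0) 12 + 2 = 8 := by simp only [min_def, max_def]; split_ifs <;> omega
                rw [harg]
              · rw [if_neg h6]
                by_cases h7 : time < 400
                · rw [if_pos h7]
                  have harg : min (max (time / 50) 0) 12 + 2 = 9 := by simp only [min_def, max_def]; split_ifs <;> omega
                  rw [harg]
                · rw [if_neg h7]
                  by_cases h8 : time < 450
                  · rw [if_pos h8]
                    have harg : min (max (time / 50) 0) 12 + 2 = 10 := by simp only [min_def, max_def]; split_ifs <;> omega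
                    rw [harg]
                  · rw [if_neg h8]
                    by_cases h9 : time < 500
                    · rw [if_pos h9]
                      have harg : min (max (time / 50) 0) 12 + 2 = 11 := by simp only [min_def, max_def]; split_ifs <;> omega
                      rw [harg]
                    · rw [if_neg h9]
                      by_cases h10 : time < 550
                      · rw [if_pos h10]
                        have harg : min (max (time / 50) 0) 12 + 2 = 12 := by simp only [min_def, max_def]; split_ifs <;> omega
                        rw [harg]
                      · rw [if_neg h10]
                        by_cases h11 : time < 600
                        · rw [if_pos h11]
                          have harg : min (max (time / 50) 0) 12 + 2 = 13 := by simp only [min_def, max_def]; split_ifs <;> omega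
                          rw [harg]
                        · rw [if_neg h11]
                          by_cases h12 : time < 650
                          · rw [if_pos h12]
                            have harg : min (max (time / 50) 0) 12 + 2 = 14 := by simp only [min_def, max_def]; split_ifs <;> omega
                            rw [harg]
                          · rw [if_neg h12]
                            have harg : min (max (time / 50) 0) 12 + 2 = 14 := by simp only [min_def, max_def]; split_ifs <;> omega
                            rw [harg]

-- A's color equals B's color
theorem pv_color_eq (time : Int) :
    pvColorLoop time
      (((PySem.List.pyRange 2 15 1).map (fun c => pvHexDigit c)).zip
        (PySem.List.pyRange 50 (14 * 50) 50))
      ((PySem.List.pyGet? ((PySem.List.pyRange 2 15 1).map (fun c => pvHexDigit c)) (-1)).getD "")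
    = pvHexDigit (min (max (PySem.Int.floordiv time 50) 0) 12 + 2) := by
  have hq : PySem.Int.floordiv time 50 = time / 50 :=
    PySem.Int.floordiv_eq_ediv_of_pos (by omega)
  have hr : (PySem.List.pyRange 2 15 1) = [2,3,4,5,6,7,8,9,10,11,12,13,14] := by decide
  have ht : (PySem.List.pyRange 50 (14*50) 50) = [50,100,150,200,250,300,350,400,450,500,550,600,650] := by decide
  rw [hq, hr, ht]
  simp only [List.map]
  have hg : (PySem.List.pyGet? [pvHexDigit 2, pvHexDigit 3, pvHexDigit 4, pvHexDigit 5,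
      pvHexDigit 6, pvHexDigit 7, pvHexDigit 8, pvHexDigit 9, pvHexDigit 10, pvHexDigit 11,
      pvHexDigit 12, pvHexDigit 13, pvHexDigit 14] (-1)).getD "" = pvHexDigit 14 := by
    simp [PySem.List.pyGet?, PySem.List.pyIdx?]
  rw [hg]
  simp only [List.zip, List.zipWith, pvColorLoop]
  exact pv_chain time pvHexDigit

-- ===== VERDICT (by name: the statement is the Claim_ definition above) =====
theorem time_to_col_spec : Claim_equal_time_to_col := by
  intro time hdom
  unfold Spec_time_to_col
  simp only [time_to_col, time_to_col_alt]
  rw [pv_color_eq]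
  rw [show String.mk [("0123456789abcdef".toList).getD
      (min (max (PySem.Int.floordiv time 50) 0) 12 + 2).toNat '?']
      = pvHexDigit (min (max (PySem.Int.floordiv time 50) 0) 12 + 2) from rfl]
  set color := pvHexDigit (min (max (PySem.Int.floordiv time 50) 0) 12 + 2) with hc
  rw [pv_foldl_append_map (fun bit => if bit == '1' then color else ".")]
  have hbound : time.natAbs < 2 ^ 32 := by
    have h : pvDomInt time = true := hdom
    unfold pvDomInt at h
    simp at h
    omega
  have hlen := pv_lsb_len color time.natAbs 32 hbound
  unfold pvBinTail
  by_cases hneg : time < 0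
  · simp only [hneg, if_true, List.nil_append, List.map_cons, List.reverse_cons,
      pv_rev_map_digits]
    have hfb : (if ('b' == '1') = true then color else (".":String)) = "." := by simp
    rw [hfb]
    generalize hL : pvLsbBits color time.natAbs = L at hlen ⊢
    have h1 : 88 - (L ++ ["."]).length = 87 - L.length := by simp
    have h2 : 88 - L.length = (87 - L.length) + 1 := by omega
    rw [h1, h2, List.replicate_succ]
    simp
  · by_cases hz : time = 0
    · subst hz
      norm_num [pvLsbBits, pvBinDigitsNat]
      rw [show (88:Nat) = 87 + 1 from rfl, List.replicate_succ]
      simp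
    · simp only [hneg, if_false, hz, List.nil_append, pv_rev_map_digits]
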